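-- pv_equiv track=rewrite | github.com/Atomic-Panda/Introduction_to_NLP | nsp.py | gen_features
-- ===== SOURCE A (Python) =====
-- def gen_features(x):
--     # 根据一个句子产生其每个字符对应的七个特征
--     for i in range(len(x)):
--         left2 = x[i - 2] if i >= 2 else '#'
--         left1 = x[i - 1] if i >= 1 else '#'
--         mid = x[i]
--         right1 = x[i + 1] if i + 1 < len(x) else '#'
--         right2 = x[i + 2] if i + 2 < len(x) else '#'
--         features = ['1' + mid, '2' + left1, '3' + right1, '4' + left2 +
--                     left1, '5' + left1 + mid, '6' + mid + right1, '7' + right1 + right2, '8' + left1 + mid + right1]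
--         yield features
-- ===== SOURCE B (Python) =====
-- def _feats(reg):
--     l2, l1, mid, r1, r2 = reg
--     return ['1' + mid, '2' + l1, '3' + r1, '4' + l2 + l1,
--             '5' + l1 + mid, '6' + mid + r1, '7' + r1 + r2,
--             '8' + l1 + mid + r1]
--
--
-- def gen_features(x):
--     # streaming shift register: a 5-char pipeline state; each input char is
--     # shifted in once, emissions lag the input by two shifts, and a flush
--     # loop drains the last positions -- no indexing into x, no boundary tests
--     n = len(x)
--     reg = ('#', '#', '#', '#', '#')
--     shifts = 0
--     emitted = 0
--     for c in x:
--         reg = reg[1:] + (c,)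
--         shifts += 1
--         if shifts >= 3:
--             yield _feats(reg)
--             emitted += 1
--     while emitted < n:
--         reg = reg[1:] + ('#',)
--         shifts += 1
--         if shifts >= 3:
--             yield _feats(reg)
--             emitted += 1
-- ===== Notes on version B (the rewrite author's own statement) =====
-- stated objective: alternative
-- what changed: Replaces A's random-access index loop with five per-position boundary conditionals by a streaming shift-register pipeline: each character is shifted once into a 5-slot register, features are emitted two shifts behind the input, and a flush loop drains the tail; no indexing into x and no boundary tests remain.
import Mathlib
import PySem

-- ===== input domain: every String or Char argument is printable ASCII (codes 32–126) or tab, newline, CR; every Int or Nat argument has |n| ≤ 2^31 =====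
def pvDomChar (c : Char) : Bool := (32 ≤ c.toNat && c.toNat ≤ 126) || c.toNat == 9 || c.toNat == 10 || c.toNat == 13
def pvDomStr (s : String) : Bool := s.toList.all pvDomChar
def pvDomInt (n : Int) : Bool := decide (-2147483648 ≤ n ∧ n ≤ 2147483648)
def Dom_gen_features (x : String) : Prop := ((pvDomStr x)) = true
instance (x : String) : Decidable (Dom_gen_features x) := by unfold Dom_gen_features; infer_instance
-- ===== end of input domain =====

-- B replaces A's index loop with per-position boundary conditionals by a streaming
-- 5-slot shift-register pipeline with a tail-flush loop (objective: alternative).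


-- ===== PORT A =====
-- A's loop: per index i, five context chars chosen by boundary conditionals.
def gen_features (x : String) : List (List String) :=
  let l := x.toList
  let n := l.length
  (List.range n).map (fun i =>
    let left2 : Char := if 2 ≤ i then l.getD (i - 2) '#' else '#'
    let left1 : Char := if 1 ≤ i then l.getD (i - 1) '#' else '#'
    let mid : Char := l.getD i '#'
    let right1 : Char := if i + 1 < n then l.getD (i + 1) '#' else '#'
    let right2 : Char := if i + 2 < n then l.getD (i + 2) '#' else '#'
    [String.ofList ['1', mid], String.ofList ['2', left1], String.ofList ['3', right1], String.ofList ['4', left2, left1],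
     String.ofList ['5', left1, mid], String.ofList ['6', mid, right1], String.ofList ['7', right1, right2],
     String.ofList ['8', left1, mid, right1]])

-- ===== PORT B =====
-- B's helper _feats: feature list from the register (l2, l1, mid, r1, r2)
def pvFeats (reg : Char × Char × Char × Char × Char) : List String :=
  match reg with
  | (l2, l1, mid, r1, r2) =>
    [String.ofList ['1', mid], String.ofList ['2', l1], String.ofList ['3', r1], String.ofList ['4', l2, l1],
     String.ofList ['5', l1, mid], String.ofList ['6', mid, r1], String.ofList ['7', r1, r2],
     String.ofList ['8', l1, mid, r1]]

-- reg = reg[1:] + (c,)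
def pvShift (reg : Char × Char × Char × Char × Char) (c : Char) : Char × Char × Char × Char × Char :=
  match reg with
  | (_, b, m, d, e) => (b, m, d, e, c)

-- one iteration of B's main for-loop (state: reg, shifts, emitted, output so far)
def pvStep (st : (Char × Char × Char × Char × Char) × Nat × Nat × List (List String)) (c : Char) :
    (Char × Char × Char × Char × Char) × Nat × Nat × List (List String) :=
  let reg' := pvShift st.1 c
  let shifts' := st.2.1 + 1
  if 3 ≤ shifts' then (reg', shifts', st.2.2.1 + 1, st.2.2.2 ++ [pvFeats reg'])
  else (reg', shifts', st.2.2.1, st.2.2.2)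

-- B's trailing 'while emitted < n' flush loop
def pvFlush (n : Nat) (reg : Char × Char × Char × Char × Char) (shifts emitted : Nat)
    (out : List (List String)) : List (List String) :=
  if emitted < n then
    let reg' := pvShift reg '#'
    let shifts' := shifts + 1
    if 3 ≤ shifts' then pvFlush n reg' shifts' (emitted + 1) (out ++ [pvFeats reg'])
    else pvFlush n reg' shifts' emitted out
  else out
termination_by (n - emitted) + (3 - shifts)
decreasing_by
  · omega
  · omega

-- B: stream the chars through a 5-slot shift register, then flush
def gen_features_alt (x : String) : List (List String) :=
  let n := x.toList.length
  let st := x.toList.foldl pvStep (('#', '#', '#', '#', '#'), 0, 0, [])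
  pvFlush n st.1 st.2.1 st.2.2.1 st.2.2.2

-- ===== PRECONDITION & SPEC =====
def Spec_gen_features (x : String) (out : List (List String)) : Prop := out = gen_features_alt x
instance (x : String) (out : List (List String)) : Decidable (Spec_gen_features x out) := by unfold Spec_gen_features; infer_instance

-- ===== CLAIM (what is proved, stated in full; the proofs are below) =====
def Claim_equal_gen_features : Prop := ∀ (x : String), Dom_gen_features x → Spec_gen_features x (gen_features x)

-- ===== LEMMAS AND PROOFS =====

-- virtual padded view: pvV l j = char at position j-2, '#' outside the string
def pvV (l : List Char) (j : Nat) : Char :=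
  if 2 ≤ j ∧ j < l.length + 2 then l.getD (j - 2) '#' else '#'

-- the feature row at position i, expressed through the padded view
def pvElem (l : List Char) (i : Nat) : List String :=
  pvFeats (pvV l i, pvV l (i + 1), pvV l (i + 2), pvV l (i + 3), pvV l (i + 4))

-- the register after s shifts
def pvWindow (l : List Char) (s : Nat) : Char × Char × Char × Char × Char :=
  (pvV l (s - 3), pvV l (s - 2), pvV l (s - 1), pvV l s, pvV l (s + 1))

theorem pv_window_succ (l : List Char) (s : Nat) :
    pvShift (pvWindow l s) (pvV l (s + 2)) = pvWindow l (s + 1) := by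
  have e1 : s + 1 - 3 = s - 2 := by omega
  have e2 : s + 1 - 2 = s - 1 := by omega
  have e3 : s + 1 - 1 = s := by omega
  simp [pvShift, pvWindow, e1, e2, e3]

theorem pv_feats_window (l : List Char) (s : Nat) (hs : 3 ≤ s) :
    pvFeats (pvWindow l s) = pvElem l (s - 3) := by
  have e1 : s - 3 + 1 = s - 2 := by omega
  have e2 : s - 3 + 2 = s - 1 := by omega
  have e3 : s - 3 + 3 = s := by omega
  have e4 : s - 3 + 4 = s + 1 := by omega
  simp [pvElem, pvWindow, e1, e2, e3, e4]

-- A's row i equals the padded-view row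
theorem pv_A_char (x : String) :
    gen_features x = (List.range x.toList.length).map (pvElem x.toList) := by
  unfold gen_features
  apply List.map_congr_left
  intro i hi
  simp only [List.mem_range] at hi
  have h1 : pvV x.toList i = (if 2 ≤ i then x.toList.getD (i - 2) '#' else '#') := by
    unfold pvV; split_ifs <;> first | rfl | (exfalso; omega)
  have h2 : pvV x.toList (i + 1) = (if 1 ≤ i then x.toList.getD (i - 1) '#' else '#') := by
    unfold pvV
    have e : i + 1 - 2 = i - 1 := by omega
    split_ifs <;> (try rw [e]) <;> first | rfl | (exfalso; omega)
  have h3 : pvV x.toList (i + 2) = x.toList.getD i '#' := by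
    unfold pvV
    have e : i + 2 - 2 = i := by omega
    split_ifs <;> (try rw [e]) <;> first | rfl | (exfalso; omega)
  have h4 : pvV x.toList (i + 3) = (if i + 1 < x.toList.length then x.toList.getD (i + 1) '#' else '#') := by
    unfold pvV
    have e : i + 3 - 2 = i + 1 := by omega
    split_ifs <;> (try rw [e]) <;> first | rfl | (exfalso; omega)
  have h5 : pvV x.toList (i + 4) = (if i + 2 < x.toList.length then x.toList.getD (i + 2) '#' else '#') := by
    unfold pvV
    have e : i + 4 - 2 = i + 2 := by omega
    split_ifs <;> (try rw [e]) <;> first | rfl | (exfalso; omega)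
  simp only [pvElem, pvFeats, h1, h2, h3, h4, h5]

-- loop invariant for B's main fold
theorem pv_loop (l : List Char) (k : Nat) (hk : k ≤ l.length) :
    (l.drop k).foldl pvStep
      (pvWindow l k, k, k - min k 2, (List.range (k - min k 2)).map (pvElem l))
    = (pvWindow l l.length, l.length, l.length - min l.length 2,
       (List.range (l.length - min l.length 2)).map (pvElem l)) := by
  induction hn : l.length - k generalizing k with
  | zero =>
      have : k = l.length := by omega
      subst this
      simp
  | succ m ih =>
      have hlt : k < l.length := by omega
      rw [List.drop_eq_getElem_cons hlt, List.foldl_cons]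
      have hchar : l[k] = pvV l (k + 2) := by
        unfold pvV
        have e : k + 2 - 2 = k := by omega
        rw [if_pos ⟨by omega, by omega⟩, e, List.getD_eq_getElem?_getD,
            List.getElem?_eq_getElem hlt]
        rfl
      have hstep : pvStep (pvWindow l k, k, k - min k 2, (List.range (k - min k 2)).map (pvElem l)) l[k]
          = (pvWindow l (k + 1), k + 1, (k + 1) - min (k + 1) 2,
             (List.range ((k + 1) - min (k + 1) 2)).map (pvElem l)) := by
        simp only [pvStep, hchar, pv_window_succ]
        by_cases h3 : 3 ≤ k + 1
        · rw [if_pos h3]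
          have hf : pvFeats (pvWindow l (k + 1)) = pvElem l (k - 2) := by
            rw [pv_feats_window l (k + 1) h3]
            congr 1
          have he : k - min k 2 = k - 2 := by omega
          have he2 : (k + 1) - min (k + 1) 2 = (k - 2) + 1 := by omega
          rw [hf, he, he2, List.range_succ, List.map_append]
          simp
        · rw [if_neg h3]
          have he : k - min k 2 = 0 := by omega
          have he2 : (k + 1) - min (k + 1) 2 = 0 := by omega
          rw [he, he2]
      rw [hstep]
      exact ih (k + 1) (by omega) (by omega)

-- one-step unfolding equation for the flush loop
theorem pvFlush_eq (n : Nat) (reg : Char × Char × Char × Char × Char) (shifts emitted : Nat)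
    (out : List (List String)) :
    pvFlush n reg shifts emitted out =
      if emitted < n then
        (if 3 ≤ shifts + 1 then
          pvFlush n (pvShift reg '#') (shifts + 1) (emitted + 1) (out ++ [pvFeats (pvShift reg '#')])
        else pvFlush n (pvShift reg '#') (shifts + 1) emitted out)
      else out := by
  rw [pvFlush]

-- past the end of the string the padded view is '#'
theorem pv_pad (l : List Char) (s : Nat) (h : l.length ≤ s) : pvV l (s + 2) = '#' := by
  unfold pvV
  rw [if_neg (by omega)]

theorem pv_shift_pad (l : List Char) (s : Nat) (h : l.length ≤ s) :
    pvShift (pvWindow l s) '#' = pvWindow l (s + 1) := by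
  rw [← pv_pad l s h, pv_window_succ]

-- the flush loop, started from the state the main fold leaves, completes the row list
theorem pv_flush (l : List Char) :
    pvFlush l.length (pvWindow l l.length) l.length (l.length - min l.length 2)
      ((List.range (l.length - min l.length 2)).map (pvElem l))
    = (List.range l.length).map (pvElem l) := by
  rcases hn : l.length with _ | _ | n
  · rw [pvFlush_eq, if_neg (by omega)]
    simp
  · -- length 1: two priming shifts, then one emission
    have s1 : pvShift (pvWindow l 1) '#' = pvWindow l 2 := pv_shift_pad l 1 (by omega)
    have s2 : pvShift (pvWindow l 2) '#' = pvWindow l 3 := pv_shift_pad l 2 (by omega)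
    have hf : pvFeats (pvWindow l 3) = pvElem l 0 := by
      rw [pv_feats_window l 3 (by omega)]
    rw [pvFlush_eq, if_pos (by omega), if_neg (by omega), s1,
        pvFlush_eq, if_pos (by omega), if_pos (by omega), s2, hf,
        pvFlush_eq, if_neg (by omega)]
    simp
  · -- length n+2: exactly two emitting shifts
    have s1 : pvShift (pvWindow l (n + 2)) '#' = pvWindow l (n + 3) := pv_shift_pad l (n + 2) (by omega)
    have s2 : pvShift (pvWindow l (n + 3)) '#' = pvWindow l (n + 4) := pv_shift_pad l (n + 3) (by omega)
    have hf1 : pvFeats (pvWindow l (n + 3)) = pvElem l n := by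
      rw [pv_feats_window l (n + 3) (by omega)]
      norm_num
    have hf2 : pvFeats (pvWindow l (n + 4)) = pvElem l (n + 1) := by
      rw [pv_feats_window l (n + 4) (by omega)]
      congr 1
    have he : n + 2 - min (n + 2) 2 = n := by omega
    rw [he,
        pvFlush_eq, if_pos (by omega), if_pos (by omega), s1, hf1,
        pvFlush_eq, if_pos (by omega), if_pos (by omega), s2, hf2,
        pvFlush_eq, if_neg (by omega)]
    simp [List.range_succ]

-- ===== VERDICT (by name: the statement is the Claim_ definition above) =====
theorem gen_features_spec : Claim_equal_gen_features := by
  intro x _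
  unfold Spec_gen_features gen_features_alt
  have h0 : pvWindow x.toList 0 = (('#' : Char), ('#' : Char), ('#' : Char), ('#' : Char), ('#' : Char)) := by
    simp [pvWindow, pvV]
  have hloop := pv_loop x.toList 0 (Nat.zero_le _)
  rw [h0] at hloop
  simp only [List.drop_zero, Nat.zero_sub, List.range_zero, List.map_nil] at hloop
  simp only [hloop]
  rw [pv_A_char]
  exact (pv_flush x.toList).symm
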